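-- pv_equiv track=rewrite | github.com/guoyingwei6/shadowrocket-lazy-custom | scripts/merge.py | insert_rules_before_final
-- ===== SOURCE A (Python) =====
-- def insert_rules_before_final(body: str, custom_rules: str) -> str:
--     """Insert custom rules immediately before the FINAL line in [Rule] section."""
--     if not custom_rules:
--         return body
--
--     lines = body.splitlines(keepends=True)
--     result = []
--     inserted = False
--
--     for line in lines:
--         if not inserted and line.strip().startswith("FINAL,"):
--             result.append("\n# --- Custom Rules ---\n")
--             result.append(custom_rules + "\n")
--             result.append("\n")
--             inserted = True
--         result.append(line)
--
--     if not inserted: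
--         # No FINAL found, append at end
--         result.append("\n# --- Custom Rules ---\n")
--         result.append(custom_rules + "\n")
--
--     return "".join(result)
-- ===== SOURCE B (Python) =====
-- def insert_rules_before_final(body: str, custom_rules: str) -> str:
--     """Scan raw character offsets (no line list): find the start offset of the
--     first FINAL, line, then splice the block in with one string slice."""
--     if not custom_rules:
--         return body
--     n = len(body)
--     pos = None
--     i = 0
--     while i < n:
--         j = i
--         while j < n and body[j] in " \t":          # skip the line's leading blanks
--             j += 1
--         if body.startswith("FINAL,", j):
--             pos = i
--             break
--         while j < n and body[j] not in "\r\n":     # advance to the line break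
--             j += 1
--         if j < n:                                  # step over it ('\r\n' is one break)
--             j += 2 if body.startswith("\r\n", j) else 1
--         i = j
--     block = "\n# --- Custom Rules ---\n" + custom_rules + "\n"
--     if pos is None:
--         return body + block
--     return body[:pos] + block + "\n" + body[pos:]
-- ===== Notes on version B (the rewrite author's own statement) =====
-- stated objective: alternative
-- what changed: A materialises the line list (splitlines(keepends=True)) and rebuilds the whole output inside one flagged accumulator loop; B never builds a line list: it scans raw character offsets with a nested skip-blanks / check-prefix / skip-to-line-break loop to compute a single insertion offset, then splices the block in with one string slice.
import Mathlib
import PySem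

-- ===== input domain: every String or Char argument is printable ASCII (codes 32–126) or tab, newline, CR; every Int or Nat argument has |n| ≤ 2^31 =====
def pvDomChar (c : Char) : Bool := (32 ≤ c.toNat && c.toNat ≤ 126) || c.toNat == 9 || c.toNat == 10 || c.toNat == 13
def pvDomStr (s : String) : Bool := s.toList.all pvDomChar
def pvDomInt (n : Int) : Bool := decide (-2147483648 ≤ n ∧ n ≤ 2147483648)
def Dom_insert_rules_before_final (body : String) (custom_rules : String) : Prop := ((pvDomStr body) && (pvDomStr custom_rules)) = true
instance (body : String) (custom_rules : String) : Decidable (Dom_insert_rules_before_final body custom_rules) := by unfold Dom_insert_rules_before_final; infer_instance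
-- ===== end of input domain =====

-- B replaces A's build-a-line-list-and-rebuild loop by a raw character-offset scan that
-- computes one insertion offset and splices with a single slice (objective: alternative).

-- shared constant: the string "FINAL," as its character list
def pvTGT : List Char := ['F', 'I', 'N', 'A', 'L', ',']

def pvHdr : List Char := "\n# --- Custom Rules ---\n".toList

-- shared helper: split off the first line (with its terminator — on the Dom alphabet the
-- line breaks are exactly '\n', '\r', '\r\n', as in Python) from the rest of the text.
def pvSplitLine : List Char → List Char × List Char
  | [] => ([], [])
  | '\r' :: '\n' :: t => (['\r', '\n'], t)
  | '\n' :: t => (['\n'], t)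
  | '\r' :: t => (['\r'], t)
  | c :: t => ((pvSplitLine t).1.cons c, (pvSplitLine t).2)

theorem pvSplitLine_append (s : List Char) : (pvSplitLine s).1 ++ (pvSplitLine s).2 = s := by
  fun_induction pvSplitLine s <;> simp_all

theorem pvSplitLine_fst_ne (s : List Char) (h : s ≠ []) : (pvSplitLine s).1 ≠ [] := by
  fun_induction pvSplitLine s <;> simp_all

-- termination measure for both ports' line loops (cited in decreasing_by)
theorem pvSplitLine_snd_lt : ∀ (s : List Char), s ≠ [] → (pvSplitLine s).2.length < s.length := by
  intro s h
  have ha := pvSplitLine_append s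
  have hf := pvSplitLine_fst_ne s h
  have := congrArg List.length ha
  simp [List.length_append] at this
  have : (pvSplitLine s).1.length ≠ 0 := by simpa using hf
  omega

-- ===== PORT A =====
-- body.splitlines(keepends=True), hand-ported (PySem has only the keepends=False form);
-- exact on the Dom alphabet, whose only line breaks are '\n', '\r', '\r\n'.
def pvSplitKeep (s : List Char) : List (List Char) :=
  if h : s = [] then []
  else (pvSplitLine s).1 :: pvSplitKeep (pvSplitLine s).2
termination_by s.length
decreasing_by exact pvSplitLine_snd_lt s h

-- A's test: line.strip().startswith("FINAL,")
def pvCond (line : List Char) : Bool :=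
  PySem.Chars.startswith (PySem.Chars.strip line) pvTGT

-- A's for-loop with its `inserted` flag, as the structural recursion over the lines
-- (the post-loop "no FINAL found" append happens at the end of the list).
def pvLoopA (cr : List Char) : List (List Char) → Bool → List (List Char)
  | [], inserted => if !inserted then [pvHdr, cr ++ ['\n']] else []
  | line :: rest, inserted =>
      if !inserted && pvCond line then
        pvHdr :: (cr ++ ['\n']) :: ['\n'] :: line :: pvLoopA cr rest true
      else
        line :: pvLoopA cr rest inserted

def insert_rules_before_final (body : String) (custom_rules : String) : String :=
  if custom_rules = "" then body
  else String.mk (PySem.Chars.join []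
    (pvLoopA custom_rules.toList (pvSplitKeep body.toList) false))

-- ===== PORT B =====
def pvBlank (c : Char) : Bool := c == ' ' || c == '\t'

-- B's while-loop over character offsets: skip the line's leading blanks (dropWhile),
-- test startswith("FINAL,") there, else step over the whole line (pvSplitLine) and
-- carry the absolute start offset `pos` of the current line.
def pvFindB (s : List Char) (pos : Nat) : Option Nat :=
  if h : s = [] then none
  else if PySem.Chars.startswith (s.dropWhile pvBlank) pvTGT then some pos
  else pvFindB (pvSplitLine s).2 (pos + (pvSplitLine s).1.length)
termination_by s.length
decreasing_by exact pvSplitLine_snd_lt s h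

def insert_rules_before_final_alt (body : String) (custom_rules : String) : String :=
  if custom_rules = "" then body
  else
    let s := body.toList
    let block := pvHdr ++ custom_rules.toList ++ ['\n']
    match pvFindB s 0 with
    | none => String.mk (s ++ block)
    | some pos => String.mk (s.take pos ++ block ++ ['\n'] ++ s.drop pos)

-- ===== PRECONDITION & SPEC =====
def Spec_insert_rules_before_final (body : String) (custom_rules : String) (out : String) : Prop := out = insert_rules_before_final_alt body custom_rules
instance (body : String) (custom_rules : String) (out : String) : Decidable (Spec_insert_rules_before_final body custom_rules out) := by unfold Spec_insert_rules_before_final; infer_instance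

-- ===== CLAIM (what is proved, stated in full; the proofs are below) =====
def Claim_equal_insert_rules_before_final : Prop := ∀ (body : String) (custom_rules : String), Dom_insert_rules_before_final body custom_rules → Spec_insert_rules_before_final body custom_rules (insert_rules_before_final body custom_rules)

-- ===== LEMMAS AND PROOFS =====

-- the first line is its content plus an all-whitespace terminator (empty only at text end)
theorem pvSplitLine_shape (s : List Char) :
    ∃ core term, (pvSplitLine s).1 = core ++ term ∧
      (∀ c ∈ term, PySem.Chars.isspace c = true) ∧
      (term = [] → (pvSplitLine s).2 = []) := by
  fun_induction pvSplitLine s with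
  | case1 => exact ⟨[], [], by simp [pvSplitLine]⟩
  | case2 t => exact ⟨[], ['\r', '\n'], by simp [pvSplitLine]; decide⟩
  | case3 t => exact ⟨[], ['\n'], by simp [pvSplitLine]; decide⟩
  | case4 t h1 => exact ⟨[], ['\r'], by simp; decide⟩
  | case5 c t h1 h2 h3 ih =>
    obtain ⟨core, term, he, hw, ht⟩ := ih
    exact ⟨c :: core, term, by simp [he], hw, ht⟩

theorem pv_rstrip_append_ws (u w : List Char) (hw : ∀ c ∈ w, PySem.Chars.isspace c = true) :
    PySem.Chars.rstrip (u ++ w) = PySem.Chars.rstrip u := by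
  unfold PySem.Chars.rstrip
  rw [List.reverse_append, List.dropWhile_append]
  have : w.reverse.dropWhile PySem.Chars.isspace = [] := by
    rw [List.dropWhile_eq_nil_iff]
    intro c hc; exact hw c (List.mem_reverse.mp hc)
  simp [this]

theorem pv_rstrip_cons_nonws (c : Char) (u : List Char) (hc : PySem.Chars.isspace c = false) :
    PySem.Chars.rstrip (c :: u) = c :: PySem.Chars.rstrip u := by
  unfold PySem.Chars.rstrip
  rw [show (c :: u).reverse = u.reverse ++ [c] by simp, List.dropWhile_append]
  by_cases h : u.reverse.dropWhile PySem.Chars.isspace = [] <;>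
    simp [h, List.dropWhile_cons, hc]

theorem pv_rstrip_cons_ws (c : Char) (u : List Char) (hc : PySem.Chars.isspace c = true) :
    PySem.Chars.rstrip (c :: u) =
      if PySem.Chars.rstrip u = [] then [] else c :: PySem.Chars.rstrip u := by
  unfold PySem.Chars.rstrip
  rw [show (c :: u).reverse = u.reverse ++ [c] by simp, List.dropWhile_append]
  by_cases h : u.reverse.dropWhile PySem.Chars.isspace = [] <;>
    simp [h, List.dropWhile_cons, hc]

-- matching an all-non-whitespace target cannot span the whitespace line terminator
theorem pvL3 (T : List Char) (hT : ∀ a ∈ T, PySem.Chars.isspace a = false) :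
    ∀ (core w r : List Char), (∀ c ∈ w, PySem.Chars.isspace c = true) → (w = [] → r = []) →
    PySem.Chars.startswith (PySem.Chars.rstrip core) T =
      PySem.Chars.startswith (core ++ (w ++ r)) T := by
  induction T with
  | nil => intro core w r _ _; simp [PySem.Chars.startswith, List.isPrefixOf]
  | cons a T' ihT =>
    intro core w r hw hwr
    have ha : PySem.Chars.isspace a = false := hT a (by simp)
    cases core with
    | nil =>
      cases w with
      | nil =>
        simp [hwr rfl, PySem.Chars.rstrip, PySem.Chars.startswith, List.isPrefixOf]
      | cons wc w' =>
        have hwc : PySem.Chars.isspace wc = true := hw wc (by simp)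
        have hne : (a == wc) = false := by
          simp only [beq_eq_false_iff_ne, ne_eq]
          intro h; subst h; simp [ha] at hwc
        simp [PySem.Chars.rstrip, PySem.Chars.startswith, List.isPrefixOf, hne]
    | cons c core' =>
      by_cases hc : PySem.Chars.isspace c = true
      · have hne : (a == c) = false := by
          simp only [beq_eq_false_iff_ne, ne_eq]
          intro h; subst h; simp [ha] at hc
        rw [pv_rstrip_cons_ws c core' hc]
        by_cases h0 : PySem.Chars.rstrip core' = [] <;>
          simp [h0, PySem.Chars.startswith, List.isPrefixOf, hne]
      · have hc' : PySem.Chars.isspace c = false := by simpa using hc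
        rw [pv_rstrip_cons_nonws c core' hc']
        simp only [PySem.Chars.startswith, List.cons_append, List.isPrefixOf] at *
        rw [ihT (fun x hx => hT x (by simp [hx])) core' w r hw hwr]

theorem pvCharNe {c d : Char} (h : c ≠ d) : c.toNat ≠ d.toNat :=
  fun hn => h (Char.ext (UInt32.toNat_inj.mp hn))

theorem pv_isspace_false (c : Char) (hcd : pvDomChar c = true)
    (h1 : c ≠ ' ') (h2 : c ≠ '\t') (h3 : c ≠ '\n') (h4 : c ≠ '\r') :
    PySem.Chars.isspace c = false := by
  have d1 := pvCharNe h1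
  have d2 := pvCharNe h2
  have d3 := pvCharNe h3
  have d4 := pvCharNe h4
  have e1 : (' ' : Char).toNat = 32 := by decide
  have e2 : ('\t' : Char).toNat = 9 := by decide
  have e3 : ('\n' : Char).toNat = 10 := by decide
  have e4 : ('\r' : Char).toNat = 13 := by decide
  rw [e1] at d1; rw [e2] at d2; rw [e3] at d3; rw [e4] at d4
  simp [pvDomChar] at hcd
  simp [PySem.Chars.isspace]
  omega

theorem pv_sw_ne_F (c : Char) (t : List Char) (h : c ≠ 'F') :
    PySem.Chars.startswith (c :: t) pvTGT = false := by
  have h' : ('F' == c) = false := by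
    rw [Bool.beq_comm]; simp [h]
  simp [PySem.Chars.startswith, pvTGT, List.isPrefixOf, h']

-- key per-line lemma: A's strip().startswith on the first line equals B's
-- skip-blanks-then-startswith on the whole remaining text
theorem pvL1 (s : List Char) (hdom : s.all pvDomChar = true) :
    pvCond (pvSplitLine s).1 =
      PySem.Chars.startswith (s.dropWhile pvBlank) pvTGT := by
  fun_induction pvSplitLine s with
  | case1 =>
    decide
  | case2 t =>
    have hb : pvBlank '\r' = false := by decide
    rw [show pvCond ['\r', '\n'] = false by decide]
    simp [List.dropWhile_cons, hb, pv_sw_ne_F '\r' _ (by decide)]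
  | case3 t =>
    have hb : pvBlank '\n' = false := by decide
    rw [show pvCond ['\n'] = false by decide]
    simp [List.dropWhile_cons, hb, pv_sw_ne_F '\n' _ (by decide)]
  | case4 t h1 =>
    have hb : pvBlank '\r' = false := by decide
    rw [show pvCond ['\r'] = false by decide]
    simp [List.dropWhile_cons, hb, pv_sw_ne_F '\r' _ (by decide)]
  | case5 c t h1 h2 h3 ih =>
    have hdc : pvDomChar c = true := by
      simp [List.all_cons] at hdom; exact hdom.1
    have hdt : t.all pvDomChar = true := by
      simp [List.all_cons] at hdom; exact List.all_eq_true.mpr hdom.2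
    by_cases hb : pvBlank c = true
    · -- leading blank: both sides discard it
      have hsp : PySem.Chars.isspace c = true := by
        simp [pvBlank] at hb
        rcases hb with rfl | rfl <;> decide
      have hstrip : ∀ u, PySem.Chars.strip (c :: u) = PySem.Chars.strip u := by
        intro u
        simp [PySem.Chars.strip, PySem.Chars.lstrip, List.dropWhile_cons, hsp]
      simp only [pvCond, hstrip, List.dropWhile_cons, hb, if_true]
      exact ih hdt
    · -- line starts with a real character
      have hb' : pvBlank c = false := by simpa using hb
      have hsp : PySem.Chars.isspace c = false := by
        refine pv_isspace_false c hdc ?_ ?_ h2 h3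
        · intro hc; subst hc; simp [pvBlank] at hb'
        · intro hc; subst hc; simp [pvBlank] at hb'
      obtain ⟨core, term, he, hw, ht⟩ := pvSplitLine_shape t
      have hstrip : PySem.Chars.strip (c :: (pvSplitLine t).1)
          = PySem.Chars.rstrip (c :: core) := by
        rw [PySem.Chars.strip, PySem.Chars.lstrip, List.dropWhile_cons]
        rw [hsp]
        simp only [if_neg Bool.false_ne_true, he]
        rw [show c :: (core ++ term) = (c :: core) ++ term by simp]
        exact pv_rstrip_append_ws (c :: core) term hw
      have hTns : ∀ a ∈ pvTGT, PySem.Chars.isspace a = false := by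
        intro a ha
        simp [pvTGT] at ha
        rcases ha with rfl | rfl | rfl | rfl | rfl | rfl <;> decide
      have hkey := pvL3 pvTGT hTns (c :: core) term (pvSplitLine t).2 hw ht
      have hrec : (c :: core) ++ (term ++ (pvSplitLine t).2) = c :: t := by
        have h2' : core ++ (term ++ (pvSplitLine t).2) = t := by
          rw [← List.append_assoc, ← he]; exact pvSplitLine_append t
        simp [h2']
      rw [pvCond, hstrip, hkey, hrec, List.dropWhile_cons, hb']
      simp

theorem pvSplitKeep_flatten (s : List Char) : (pvSplitKeep s).flatten = s := by
  fun_induction pvSplitKeep s <;> simp_all [pvSplitLine_append]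

theorem pvFindB_eq (n : Nat) : ∀ (s : List Char) (pos : Nat), s.length ≤ n → s.all pvDomChar = true →
    pvFindB s pos = ((pvSplitKeep s).findIdx? pvCond).map
      (fun i => pos + (((pvSplitKeep s).take i).flatten).length) := by
  induction n with
  | zero =>
    intro s pos hlen _
    have : s = [] := List.eq_nil_of_length_eq_zero (Nat.le_zero.mp hlen)
    subst this
    simp [pvFindB, pvSplitKeep]
  | succ n ih =>
    intro s pos hlen hdom
    by_cases h : s = []
    · subst h; simp [pvFindB, pvSplitKeep]
    · rw [pvFindB, dif_neg h, pvSplitKeep, dif_neg h]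
      have hdsnd : (pvSplitLine s).2.all pvDomChar = true := by
        have := pvSplitLine_append s
        rw [List.all_eq_true] at hdom ⊢
        intro x hx
        exact hdom x (by rw [← this]; exact List.mem_append_right _ hx)
      rw [← pvL1 s hdom]
      by_cases hc : pvCond (pvSplitLine s).1 = true
      · simp [hc, List.findIdx?_cons]
      · have hc' : pvCond (pvSplitLine s).1 = false := by simpa using hc
        have hlt := pvSplitLine_snd_lt s h
        rw [hc', if_neg (by simp)]
        rw [ih (pvSplitLine s).2 (pos + (pvSplitLine s).1.length) (by omega) hdsnd]
        rw [List.findIdx?_cons, hc', if_neg (by simp)]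
        cases hfi : (pvSplitKeep (pvSplitLine s).2).findIdx? pvCond with
        | none => simp [hfi]
        | some i =>
          simp only [hfi, Option.map_some, Option.map_map]
          congr 1
          simp [List.take_succ_cons, List.flatten_cons, List.length_append]
          omega

theorem pvLoopA_true (cr : List Char) (lines : List (List Char)) :
    pvLoopA cr lines true = lines := by
  induction lines with
  | nil => rfl
  | cons l rest ih => simp [pvLoopA, ih]

theorem pvLoopA_false (cr : List Char) (lines : List (List Char)) :
    pvLoopA cr lines false =
      match lines.findIdx? pvCond with
      | none => lines ++ [pvHdr, cr ++ ['\n']]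
      | some i => lines.take i ++ [pvHdr, cr ++ ['\n'], ['\n']] ++ lines.drop i := by
  induction lines with
  | nil => rfl
  | cons l rest ih =>
    by_cases h : pvCond l = true
    · simp [pvLoopA, h, List.findIdx?_cons, pvLoopA_true]
    · simp only [pvLoopA, Bool.not_false, Bool.true_and, h, if_false, ih,
        List.findIdx?_cons]
      cases hf : rest.findIdx? pvCond with
      | none => simp [h, hf]
      | some i => simp [h, hf]

theorem pv_inter_nil_flatten (l : List (List Char)) :
    (List.intersperse ([] : List Char) l).flatten = l.flatten := by
  induction l with
  | nil => rfl
  | cons a t ih =>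
    cases t with
    | nil => rfl
    | cons b u => simp_all [List.intersperse]

theorem pv_join_nil (l : List (List Char)) :
    PySem.Chars.join [] l = l.flatten := by
  simp [PySem.Chars.join, List.intercalate, pv_inter_nil_flatten]

theorem pv_take_drop_flatten (L : List (List Char)) (i : Nat) :
    L.flatten.take ((List.take i (List.map List.length L)).sum) = (L.take i).flatten
    ∧ L.flatten.drop ((List.take i (List.map List.length L)).sum) = (L.drop i).flatten := by
  induction L generalizing i with
  | nil => simp
  | cons x L' ih =>
    cases i with
    | zero => simp
    | succ j =>
      simp [List.take_succ_cons, List.drop_succ_cons, (ih j).1, (ih j).2,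
        List.take_append, List.drop_append]

theorem pv_main (body custom_rules : String)
    (hdom : body.toList.all pvDomChar = true) (h : ¬ custom_rules = "") :
    insert_rules_before_final body custom_rules
      = insert_rules_before_final_alt body custom_rules := by
  simp only [insert_rules_before_final, insert_rules_before_final_alt]
  rw [if_neg h, if_neg h]
  rw [pvLoopA_false, pv_join_nil]
  rw [pvFindB_eq body.toList.length body.toList 0 le_rfl hdom]
  cases hf : (pvSplitKeep body.toList).findIdx? pvCond with
  | none =>
    simp [List.flatten_append, pvSplitKeep_flatten, List.append_assoc]
  | some i =>
    simp only [Option.map_some]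
    have hTD := pv_take_drop_flatten (pvSplitKeep body.toList) i
    rw [pvSplitKeep_flatten] at hTD
    have htake := hTD.1
    have hdrop := hTD.2
    simp [List.flatten_append, htake, hdrop, List.append_assoc]

-- ===== VERDICT (by name: the statement is the Claim_ definition above) =====
theorem insert_rules_before_final_spec : Claim_equal_insert_rules_before_final := by
  intro body custom_rules hdom
  unfold Spec_insert_rules_before_final
  by_cases h : custom_rules = ""
  · simp [insert_rules_before_final, insert_rules_before_final_alt, h]
  · have hb : body.toList.all pvDomChar = true := by
      have := hdom; unfold Dom_insert_rules_before_final pvDomStr at this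
      exact (Bool.and_eq_true_iff.mp this).1
    exact pv_main body custom_rules hb h
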